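-- pv_equiv track=rewrite | github.com/hs-ryu/TIL | python/알고리즘/naver.py | solution
-- ===== SOURCE A (Python) =====
-- def solution(burbs):
--     result = 0
--
--     # cnt = 1
--     # lastNum = 1
--     # for i in range(len(lights)):
--     #     if lights[i] == cnt:
--     #         result += 1
--     #         cnt = lastNum + 1
--     #         lastNum = cnt
--     #     elif lastNum < lights[i]:
--     #         lastNum = lights[i]
--
--     on = 0
--     waiting = set()
--     for i in range(len(burbs)):
--         # 만약 현재 켜려는 전구가 켜저있는 바로 다음 전구라면?
--         # 켜지고, 켜지길 기다리는 전구들도 체크해준다. 1,3,4,5,2 순이라면 2가 켜질때 waiting에 3,4,5가 들어있을거다.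
--         # 얘네도 다 켜줘야한다. 켜 주고, wating에서 삭제해준다.
--         if burbs[i]-1 == on:
--             on = burbs[i]
--             result += 1
--             while True:
--                 nextBurb = on + 1
--                 if nextBurb in waiting:
--                     waiting.remove(nextBurb)
--                     on = nextBurb
--                 else:
--                     break
--         # 아니라면, wating에 집어넣는다.
--         else:
--             waiting.add(burbs[i])
--     return result
-- ===== SOURCE B (Python) =====
-- def solution(burbs):
--     # first-occurrence index of each value
--     pos = {}
--     for i, v in enumerate(burbs):
--         if v not in pos:
--             pos[v] = i
--     result = 0
--     m = -1
--     b = 1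
--     while b in pos:
--         p = pos[b]
--         if p > m:
--             result += 1
--             m = p
--         b += 1
--     return result
-- ===== Notes on version B (the rewrite author's own statement) =====
-- stated objective: alternative
-- what changed: Replaces A's arrival-order simulation (growing 'on' chain plus a waiting set drained by an inner while loop) with a first-occurrence index dict scanned in value order b = 1, 2, ..., counting b as a trigger when its first-occurrence position exceeds the running maximum of the earlier values' positions.
import Mathlib
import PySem

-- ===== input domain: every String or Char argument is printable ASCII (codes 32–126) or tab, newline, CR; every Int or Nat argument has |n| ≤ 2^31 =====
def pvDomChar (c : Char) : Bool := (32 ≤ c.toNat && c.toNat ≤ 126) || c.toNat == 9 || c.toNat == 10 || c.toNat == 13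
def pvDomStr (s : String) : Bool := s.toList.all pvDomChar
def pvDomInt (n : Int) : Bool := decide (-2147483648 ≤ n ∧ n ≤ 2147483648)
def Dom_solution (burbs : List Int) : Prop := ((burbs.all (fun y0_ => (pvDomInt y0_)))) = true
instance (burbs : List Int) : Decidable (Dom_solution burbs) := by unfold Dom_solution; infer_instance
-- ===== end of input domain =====

-- B replaces A's arrival-order simulation (waiting set + drain loop) with a first-occurrence
-- index scanned in VALUE order; objective: alternative (same asymptotic cost, different algorithm).

-- ===== PORT A =====
-- Python's inner 'while True: nextBurb = on+1; if nextBurb in waiting: remove & advance else break'.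
-- fuel = waiting.length at entry: each iteration removes one element of waiting, so the Python
-- loop cannot run more than waiting.length times; this fuel recursion is exact.
-- waiting.remove(nextBurb) runs only under the membership test, so it never raises; Set.discard
-- equals Python's set.remove on a present element.
def drainA (fuel : Nat) (onv : Int) (waiting : PySem.Set Int) : Int × PySem.Set Int :=
  match fuel with
  | 0 => (onv, waiting)
  | f + 1 =>
    let nextBurb := onv + 1
    if PySem.Set.contains waiting nextBurb then
      drainA f nextBurb (PySem.Set.discard waiting nextBurb)
    else (onv, waiting)

-- 'for i in range(len(burbs)): … burbs[i] …' reads exactly the elements in order (every index in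
-- range), so it is ported as a fold over the list.
def stepA (st : Int × Int × PySem.Set Int) (v : Int) : Int × Int × PySem.Set Int :=
  let result := st.1
  let onv := st.2.1
  let waiting := st.2.2
  if v - 1 = onv then
    let r := drainA waiting.length v waiting
    (result + 1, r.1, r.2)
  else
    (result, onv, PySem.Set.add waiting v)

def solution (burbs : List Int) : Int :=
  (burbs.foldl stepA (0, 0, (PySem.Set.empty : PySem.Set Int))).1

-- ===== PORT B =====
-- first-occurrence index: 'for i, v in enumerate(burbs): if v not in pos: pos[v] = i'
def buildPos (burbs : List Int) : PySem.Dict Int Int :=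
  (PySem.List.enumerate burbs).foldl
    (fun pos iv => if pos.contains iv.2 then pos else pos.insert iv.2 iv.1)
    PySem.Dict.empty

-- 'while b in pos: p = pos[b]; if p > m: result += 1; m = p; b += 1'.
-- fuel = number of keys of pos: the values 1..b-1 visited are distinct keys of pos, so the
-- Python while loop runs at most (number of keys) times; this fuel recursion is exact.
def altLoop (pos : PySem.Dict Int Int) : Nat → Int → Int → Int → Int
  | 0, _, res, _ => res
  | f + 1, b, res, m =>
    match pos.get? b with
    | none => res
    | some p => if p > m then altLoop pos f (b + 1) (res + 1) p else altLoop pos f (b + 1) res m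

def solution_alt (burbs : List Int) : Int :=
  let pos := buildPos burbs
  altLoop pos pos.items.length 1 0 (-1)

-- ===== PRECONDITION & SPEC =====
def Spec_solution (burbs : List Int) (out : Int) : Prop := out = solution_alt burbs
instance (burbs : List Int) (out : Int) : Decidable (Spec_solution burbs out) := by unfold Spec_solution; infer_instance

-- ===== CLAIM (what is proved, stated in full; the proofs are below) =====
def Claim_equal_solution : Prop := ∀ (burbs : List Int), Dom_solution burbs → Spec_solution burbs (solution burbs)

-- ===== LEMMAS AND PROOFS =====

-- the "chain" c of xs: 1..c all occur in xs, c+1 does not (the value A's 'on' tracks)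
def ChainProp (xs : List Int) (c : Int) : Prop :=
  0 ≤ c ∧ (∀ j : Int, 0 < j → j ≤ c → j ∈ xs) ∧ (c + 1) ∉ xs

lemma drainA_spec (fuel : Nat) :
    ∀ (w : PySem.Set Int) (onv : Int) (xs : List Int),
      w.Nodup → w.length ≤ fuel → (∀ x : Int, onv < x → (x ∈ w ↔ x ∈ xs)) →
      onv ≤ (drainA fuel onv w).1 ∧
      (∀ j : Int, onv < j → j ≤ (drainA fuel onv w).1 → j ∈ xs) ∧
      ((drainA fuel onv w).1 + 1) ∉ xs ∧
      (drainA fuel onv w).2.Nodup ∧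
      (∀ x : Int, (drainA fuel onv w).1 < x → (x ∈ (drainA fuel onv w).2 ↔ x ∈ xs)) := by
  induction fuel with
  | zero =>
    intro w onv xs hnd hlen hmem
    have hw : w = [] := List.eq_nil_of_length_eq_zero (by omega)
    subst hw
    simp only [drainA]
    refine ⟨le_refl _, by intro j h1 h2; omega, ?_, hnd, hmem⟩
    intro hin
    simpa using (hmem (onv + 1) (by omega)).mpr hin
  | succ f ih =>
    intro w onv xs hnd hlen hmem
    by_cases hc : PySem.Set.contains w (onv + 1)
    · have hmemw : (onv + 1) ∈ w := (PySem.Set.contains_iff w (onv + 1)).mp hc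
      have hinxs : (onv + 1) ∈ xs := (hmem (onv + 1) (by omega)).mp hmemw
      have hth : drainA (f + 1) onv w =
          drainA f (onv + 1) (PySem.Set.discard w (onv + 1)) := by
        simp [drainA, hmemw]
      have hnd' : (PySem.Set.discard w (onv + 1)).Nodup := PySem.Set.nodup_discard _ _ hnd
      have hlen' : (PySem.Set.discard w (onv + 1)).length ≤ f := by
        have : (PySem.Set.discard w (onv + 1)).length < w.length := by
          simp only [PySem.Set.discard]
          rw [List.length_filter_lt_length_iff_exists]
          exact ⟨onv + 1, hmemw, by simp⟩
        omega
      have hmem' : ∀ x : Int, onv + 1 < x →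
          (x ∈ PySem.Set.discard w (onv + 1) ↔ x ∈ xs) := by
        intro x hx
        rw [PySem.Set.mem_discard]
        constructor
        · intro hx2; exact (hmem x (by omega)).mp hx2.1
        · intro hx2; exact ⟨(hmem x (by omega)).mpr hx2, by omega⟩
      obtain ⟨h1, h2, h3, h4, h5⟩ := ih (PySem.Set.discard w (onv + 1)) (onv + 1) xs hnd' hlen' hmem'
      rw [hth]
      refine ⟨by omega, ?_, h3, h4, h5⟩
      intro j hj1 hj2
      by_cases hje : j = onv + 1
      · exact hje ▸ hinxs
      · exact h2 j (by omega) hj2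
    · have hmemw : (onv + 1) ∉ w := fun h => hc ((PySem.Set.contains_iff w (onv + 1)).mpr h)
      have hth : drainA (f + 1) onv w = (onv, w) := by simp [drainA, hmemw]
      rw [hth]
      refine ⟨le_refl _, by intro j h1 h2; omega, ?_, hnd, hmem⟩
      intro hin
      exact hc ((PySem.Set.contains_iff w (onv + 1)).mpr ((hmem (onv + 1) (by omega)).mpr hin))

-- properties of buildPos, by induction over the list from the right
lemma buildPos_append (xs : List Int) (v : Int) :
    buildPos (xs ++ [v]) =
      (if (buildPos xs).contains v then buildPos xs
       else (buildPos xs).insert v (xs.length : Int)) := by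
  unfold buildPos
  rw [PySem.List.enumerate_append, List.foldl_append]
  simp [PySem.List.enumerate]

lemma buildPos_inv (xs : List Int) :
    (∀ w : Int, ((buildPos xs).get? w).isSome ↔ w ∈ xs) ∧
    (∀ w p : Int, (buildPos xs).get? w = some p → 0 ≤ p ∧ p < (xs.length : Int)) ∧
    (buildPos xs).keys.Nodup := by
  induction xs using List.reverseRecOn with
  | nil =>
    refine ⟨?_, ?_, ?_⟩ <;> simp [buildPos, PySem.List.enumerate, PySem.Dict.empty,
      PySem.Dict.get?, PySem.Dict.keys]
  | append_singleton xs v ih =>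
    obtain ⟨hsome, hbound, hnd⟩ := ih
    rw [buildPos_append]
    by_cases hc : (buildPos xs).contains v
    · have hvmem : v ∈ xs := by
        have := (hsome v)
        rw [PySem.Dict.contains_eq_isSome_get?] at hc
        exact this.mp hc
      rw [if_pos hc]
      refine ⟨?_, ?_, hnd⟩
      · intro w
        rw [hsome w]
        simp only [List.mem_append, List.mem_singleton]
        constructor
        · exact fun h => Or.inl h
        · rintro (h | rfl)
          · exact h
          · exact hvmem
      · intro w p hp
        have := hbound w p hp
        simp only [List.length_append, List.length_singleton]
        push_cast
        omega
    · rw [if_neg hc]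
      refine ⟨?_, ?_, ?_⟩
      · intro w
        by_cases hwv : w = v
        · subst hwv
          rw [PySem.Dict.get?_insert_self]
          simp
        · rw [PySem.Dict.get?_insert_of_ne _ _ hwv, hsome w]
          simp only [List.mem_append, List.mem_singleton]
          constructor
          · exact fun h => Or.inl h
          · rintro (h | rfl)
            · exact h
            · exact absurd rfl hwv
      · intro w p hp
        by_cases hwv : w = v
        · subst hwv
          rw [PySem.Dict.get?_insert_self] at hp
          have : p = (xs.length : Int) := by injection hp; omega
          subst this
          simp only [List.length_append, List.length_singleton]
          push_cast
          omega
        · rw [PySem.Dict.get?_insert_of_ne _ _ hwv] at hp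
          have := hbound w p hp
          simp only [List.length_append, List.length_singleton]
          push_cast
          omega
      · rw [PySem.Dict.keys_insert_of_not_contains _ _ (by simpa using hc)]
        rw [List.nodup_append]
        refine ⟨hnd, List.nodup_singleton v, ?_⟩
        intro a ha b hb
        have hb' : b = v := by simpa using hb
        subst hb'
        intro hav
        subst hav
        rw [← PySem.Dict.contains_iff_mem_keys] at ha
        exact hc ha

-- c.toNat distinct keys 1..c of pos bound its item count from below
lemma dict_card (pos : PySem.Dict Int Int) (c : Int)
    (h : ∀ j : Int, 1 ≤ j → j ≤ c → (pos.get? j).isSome) :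
    c.toNat ≤ pos.items.length := by
  have hsub : ((List.range c.toNat).map (fun k : Nat => ((k : Int) + 1))) ⊆ pos.keys := by
    intro x hx
    obtain ⟨k, hk, rfl⟩ := List.exists_of_mem_map hx
    have hk' : k < c.toNat := List.mem_range.mp hk
    have := h ((k : Int) + 1) (by omega) (by omega)
    rw [← PySem.Dict.contains_eq_isSome_get?] at this
    exact (PySem.Dict.contains_iff_mem_keys _ _).mp this
  have hndl : ((List.range c.toNat).map (fun k : Nat => ((k : Int) + 1))).Nodup := by
    refine List.Nodup.map ?_ List.nodup_range
    intro a b hab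
    simp only at hab
    omega
  have hle := (hndl.subperm hsub).length_le
  rw [List.length_map, List.length_range] at hle
  simpa [PySem.Dict.keys] using hle

lemma altLoop_stop (pos : PySem.Dict Int Int) (b : Int) (h : pos.get? b = none) :
    ∀ fuel res m, altLoop pos fuel b res m = res := by
  intro fuel res m
  cases fuel with
  | zero => simp [altLoop]
  | succ f => simp [altLoop, h]

-- every remaining key's position is below m: the loop adds nothing
lemma altLoop_hi (pos : PySem.Dict Int Int) :
    ∀ (fuel : Nat) (b res m : Int), (∀ j p : Int, b ≤ j → pos.get? j = some p → p < m) →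
      altLoop pos fuel b res m = res := by
  intro fuel
  induction fuel with
  | zero => intro b res m _; simp [altLoop]
  | succ f ih =>
    intro b res m h
    cases hq : pos.get? b with
    | none => simp [altLoop, hq]
    | some p =>
      have hp : p < m := h b p (le_refl _) hq
      simp only [altLoop, hq]
      rw [if_neg (by omega)]
      exact ih (b + 1) res m (fun j q hj hjq => h j q (by omega) hjq)

-- two loops that agree on keys 1..c and both stop at c+1 return the same result
lemma altLoop_congr (pos pos' : PySem.Dict Int Int) (c : Int)
    (hstop : pos.get? (c + 1) = none) (hstop' : pos'.get? (c + 1) = none) :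
    ∀ (d : Nat) (b : Int) (fuel fuel' : Nat) (res m : Int),
      b ≤ c + 1 → d = (c + 1 - b).toNat → d ≤ fuel → d ≤ fuel' →
      (∀ j : Int, b ≤ j → j ≤ c → (pos.get? j).isSome ∧ pos.get? j = pos'.get? j) →
      altLoop pos fuel b res m = altLoop pos' fuel' b res m := by
  intro d
  induction d with
  | zero =>
    intro b fuel fuel' res m hb hd _ _ _
    have : b = c + 1 := by omega
    subst this
    rw [altLoop_stop pos _ hstop, altLoop_stop pos' _ hstop']
  | succ d ih =>
    intro b fuel fuel' res m hb hd hf hf' hag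
    have hblt : b ≤ c := by omega
    obtain ⟨hs, heq⟩ := hag b (le_refl _) hblt
    obtain ⟨f, rfl⟩ : ∃ f, fuel = f + 1 := ⟨fuel - 1, by omega⟩
    obtain ⟨f', rfl⟩ : ∃ f', fuel' = f' + 1 := ⟨fuel' - 1, by omega⟩
    obtain ⟨p, hp⟩ := Option.isSome_iff_exists.mp hs
    simp only [altLoop, hp, ← heq]
    have hrec : ∀ res' m' : Int, altLoop pos f (b + 1) res' m' = altLoop pos' f' (b + 1) res' m' :=
      fun res' m' => ih (b + 1) f f' res' m' (by omega) (by omega) (by omega) (by omega)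
        (fun j hj hjc => hag j (by omega) hjc)
    split_ifs <;> exact hrec _ _

-- pos' = pos plus a new key c+1 whose value n exceeds every value of pos:
-- the run on pos' returns exactly one more than the run on pos
lemma altLoop_plus1 (pos pos' : PySem.Dict Int Int) (c n : Int)
    (hstop : pos.get? (c + 1) = none) (hnew : pos'.get? (c + 1) = some n)
    (hagree : ∀ j : Int, j ≠ c + 1 → pos'.get? j = pos.get? j)
    (hlt : ∀ j p : Int, pos.get? j = some p → p < n) :
    ∀ (d : Nat) (b : Int) (fuel fuel' : Nat) (res m : Int),
      b ≤ c + 1 → d = (c + 1 - b).toNat → d ≤ fuel → d + 1 ≤ fuel' → m < n →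
      (∀ j : Int, b ≤ j → j ≤ c → (pos.get? j).isSome) →
      altLoop pos' fuel' b res m = altLoop pos fuel b res m + 1 := by
  intro d
  induction d with
  | zero =>
    intro b fuel fuel' res m hb hd _ hf' hm _
    have : b = c + 1 := by omega
    subst this
    rw [altLoop_stop pos _ hstop]
    obtain ⟨f', rfl⟩ : ∃ f', fuel' = f' + 1 := ⟨fuel' - 1, by omega⟩
    simp only [altLoop, hnew]
    rw [if_pos (by omega)]
    apply altLoop_hi
    intro j p hj hjp
    have hjq : pos'.get? j = pos.get? j := hagree j (by omega)
    exact hlt j p (hjq ▸ hjp)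
  | succ d ih =>
    intro b fuel fuel' res m hb hd hf hf' hm hsome
    have hblt : b ≤ c := by omega
    have hs := hsome b (le_refl _) hblt
    obtain ⟨p, hp⟩ := Option.isSome_iff_exists.mp hs
    have hpn : p < n := hlt b p hp
    have heq : pos'.get? b = pos.get? b := hagree b (by omega)
    obtain ⟨f, rfl⟩ : ∃ f, fuel = f + 1 := ⟨fuel - 1, by omega⟩
    obtain ⟨f', rfl⟩ : ∃ f', fuel' = f' + 1 := ⟨fuel' - 1, by omega⟩
    simp only [altLoop, hp, heq]
    have hrec := fun (m' : Int) (hm' : m' < n) (res' : Int) =>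
      ih (b + 1) f f' res' m' (by omega) (by omega) (by omega) (by omega) hm'
        (fun j hj hjc => hsome j (by omega) hjc)
    split_ifs
    · exact hrec p hpn _
    · exact hrec m hm _

-- B's value grows by 1 exactly when v extends the chain of xs
lemma Bstep (xs : List Int) (v c : Int) (hch : ChainProp xs c) :
    solution_alt (xs ++ [v]) = solution_alt xs + (if v = c + 1 then 1 else 0) := by
  obtain ⟨hc0, hcm, hcn⟩ := hch
  obtain ⟨hsome, hbound, hnd⟩ := buildPos_inv xs
  have hstop : (buildPos xs).get? (c + 1) = none := by
    rw [← Option.not_isSome_iff_eq_none, hsome]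
    exact hcn
  have hcard : c.toNat ≤ (buildPos xs).items.length := by
    apply dict_card
    intro j h1 h2
    exact (hsome j).mpr (hcm j (by omega) h2)
  by_cases hvin : v ∈ xs
  · -- duplicate value: the dict is unchanged, and v ≠ c+1 since c+1 ∉ xs
    have hcont : (buildPos xs).contains v := by
      rw [PySem.Dict.contains_eq_isSome_get?, hsome]; exact hvin
    have hbp : buildPos (xs ++ [v]) = buildPos xs := by
      rw [buildPos_append, if_pos hcont]
    have hvne : v ≠ c + 1 := fun h => hcn (h ▸ hvin)
    rw [if_neg hvne]
    simp only [solution_alt, hbp, add_zero]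
  · have hcont : ¬ (buildPos xs).contains v := by
      rw [PySem.Dict.contains_eq_isSome_get?, hsome]
      simpa using hvin
    have hbp : buildPos (xs ++ [v]) = (buildPos xs).insert v (xs.length : Int) := by
      rw [buildPos_append, if_neg hcont]
    have hlen : ((buildPos xs).insert v ((xs.length : Int))).items.length =
        (buildPos xs).items.length + 1 := by
      rw [PySem.Dict.insert, if_neg hcont]
      simp
    by_cases hveq : v = c + 1
    · subst hveq
      rw [if_pos rfl]
      simp only [solution_alt, hbp, hlen]
      refine altLoop_plus1 (buildPos xs) ((buildPos xs).insert (c + 1) ((xs.length : Int))) c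
        ((xs.length : Int)) hstop ?_ ?_ ?_ c.toNat 1 ((buildPos xs).items.length)
        ((buildPos xs).items.length + 1) 0 (-1) (by omega) (by omega) (by omega) (by omega)
        (by omega) ?_
      · rw [PySem.Dict.get?_insert_self]
      · intro j hj
        exact PySem.Dict.get?_insert_of_ne _ _ hj
      · intro j p hp
        have := hbound j p hp
        omega
      · intro j h1 h2
        exact (hsome j).mpr (hcm j (by omega) h2)
    · rw [if_neg hveq]
      have hvout : ∀ j : Int, 1 ≤ j → j ≤ c + 1 → j ≠ v := by
        intro j h1 h2 hjv
        subst hjv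
        rcases eq_or_lt_of_le h2 with h | h
        · exact hveq h
        · exact hvin (hcm j (by omega) (by omega))
      simp only [solution_alt, hbp, hlen, add_zero]
      refine (altLoop_congr (buildPos xs) ((buildPos xs).insert v ((xs.length : Int))) c hstop
        ?_ c.toNat 1 ((buildPos xs).items.length) ((buildPos xs).items.length + 1) 0 (-1)
        (by omega) (by omega) (by omega) (by omega) ?_).symm
      · rw [PySem.Dict.get?_insert_of_ne _ _ (hvout (c + 1) (by omega) (by omega)), hstop]
      · intro j h1 h2
        refine ⟨(hsome j).mpr (hcm j (by omega) h2), ?_⟩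
        rw [PySem.Dict.get?_insert_of_ne _ _ (hvout j h1 (by omega))]

-- the main invariant of A's fold
def InvA (xs : List Int) (st : Int × Int × PySem.Set Int) : Prop :=
  st.1 = solution_alt xs ∧ ChainProp xs st.2.1 ∧ st.2.2.Nodup ∧
    (∀ x : Int, st.2.1 < x → (x ∈ st.2.2 ↔ x ∈ xs))

lemma foldA_inv (xs : List Int) : InvA xs (xs.foldl stepA (0, 0, (PySem.Set.empty : PySem.Set Int))) := by
  induction xs using List.reverseRecOn with
  | nil =>
    simp only [List.foldl_nil, InvA]
    refine ⟨by decide, ⟨le_refl 0, ?_, by simp⟩, List.nodup_nil, ?_⟩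
    · intro j h1 h2
      exact absurd h2 (by omega)
    · intro x _
      simp [PySem.Set.empty]
  | append_singleton xs v ih =>
    rw [List.foldl_append, List.foldl_cons, List.foldl_nil]
    set st := xs.foldl stepA (0, 0, (PySem.Set.empty : PySem.Set Int)) with hst
    obtain ⟨hres, hch, hnd, hmem⟩ := ih
    have hBs := Bstep xs v st.2.1 hch
    by_cases htr : v - 1 = st.2.1
    · -- trigger: v = on + 1
      have hveq : v = st.2.1 + 1 := by omega
      have hdr := drainA_spec st.2.2.length st.2.2 v xs hnd (le_refl _)
        (fun x hx => hmem x (by omega))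
      obtain ⟨h1, h2, h3, h4, h5⟩ := hdr
      have hstep : stepA st v =
          (st.1 + 1, (drainA st.2.2.length v st.2.2).1, (drainA st.2.2.length v st.2.2).2) := by
        simp [stepA, htr]
      rw [hstep]
      simp only [InvA]
      obtain ⟨hc0, hcm, hcn⟩ := hch
      refine ⟨?_, ⟨by omega, ?_, ?_⟩, h4, ?_⟩
      · rw [hBs, if_pos hveq, hres]
      · intro j hj1 hj2
        by_cases hjv : j ≤ st.2.1
        · exact List.mem_append_left _ (hcm j hj1 hjv)
        · by_cases hjv2 : j = v
          · rw [hjv2]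
            exact List.mem_append_right xs (List.mem_singleton_self v)
          · exact List.mem_append_left _ (h2 j (by omega) hj2)
      · intro hmem'
        rcases List.mem_append.mp hmem' with hmem' | hmem'
        · exact h3 hmem'
        · have : (drainA st.2.2.length v st.2.2).1 + 1 = v := by simpa using hmem'
          omega
      · intro x hx
        rw [h5 x hx]
        simp only [List.mem_append, List.mem_singleton]
        constructor
        · exact fun h => Or.inl h
        · rintro (h | rfl)
          · exact h
          · omega
    · -- no trigger: v goes to waiting
      have hstep : stepA st v = (st.1, st.2.1, PySem.Set.add st.2.2 v) := by
        simp [stepA, htr]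
      rw [hstep]
      simp only [InvA]
      obtain ⟨hc0, hcm, hcn⟩ := hch
      have hvne : v ≠ st.2.1 + 1 := by omega
      refine ⟨?_, ⟨hc0, ?_, ?_⟩, PySem.Set.nodup_add _ _ hnd, ?_⟩
      · rw [hBs, if_neg hvne, add_zero, hres]
      · intro j hj1 hj2
        exact List.mem_append_left _ (hcm j hj1 hj2)
      · intro hmem'
        rcases List.mem_append.mp hmem' with hmem' | hmem'
        · exact hcn hmem'
        · have : st.2.1 + 1 = v := by simpa using hmem'
          omega
      · intro x hx
        rw [PySem.Set.mem_add]
        simp only [List.mem_append, List.mem_singleton]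
        rw [hmem x hx]

-- ===== VERDICT (by name: the statement is the Claim_ definition above) =====
theorem solution_spec : Claim_equal_solution := by
  intro burbs _
  unfold Spec_solution solution
  exact (foldA_inv burbs).1
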